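-- pv_equiv track=rewrite | github.com/alvachen-git/tradingart | update_stock_company_profile_tags.py | _is_allowed_domain
-- ===== SOURCE A (Python) =====
-- OFFICIAL_DOMAINS = {
--     "cninfo.com.cn",
--     "sse.com.cn",
--     "szse.cn",
--     "szse.com.cn",
-- }
--
-- MEDIA_DOMAINS = {
--     "stcn.com",
--     "cnstock.com",
--     "cs.com.cn",
--     "cls.cn",
--     "finance.sina.com.cn",
--     "eastmoney.com",
--     "10jqka.com.cn",
-- }
--
-- def _is_allowed_domain(domain: str) -> bool:
--     d = str(domain or "").lower().strip()
--     if not d: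
--         return False
--     for suffix in OFFICIAL_DOMAINS | MEDIA_DOMAINS:
--         if d == suffix or d.endswith("." + suffix):
--             return True
--     return False
-- ===== SOURCE B (Python) =====
-- OFFICIAL_DOMAINS = {
--     "cninfo.com.cn",
--     "sse.com.cn",
--     "szse.cn",
--     "szse.com.cn",
-- }
--
-- MEDIA_DOMAINS = {
--     "stcn.com",
--     "cnstock.com",
--     "cs.com.cn",
--     "cls.cn",
--     "finance.sina.com.cn",
--     "eastmoney.com",
--     "10jqka.com.cn",
-- }
--
-- ALLOWED = OFFICIAL_DOMAINS | MEDIA_DOMAINS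
--
-- def _is_allowed_domain(domain: str) -> bool:
--     d = str(domain or "").lower().strip()
--     if not d:
--         return False
--     if d in ALLOWED:
--         return True
--     for i, ch in enumerate(d):
--         if ch == '.' and d[i + 1:] in ALLOWED:
--             return True
--     return False
-- ===== Notes on version B (the rewrite author's own statement) =====
-- stated objective: alternative
-- what changed: B checks the normalized domain's own dot-boundary suffixes against the allowed set (set lookup per '.' position) instead of scanning every allowed domain and calling endswith.
import Mathlib
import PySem

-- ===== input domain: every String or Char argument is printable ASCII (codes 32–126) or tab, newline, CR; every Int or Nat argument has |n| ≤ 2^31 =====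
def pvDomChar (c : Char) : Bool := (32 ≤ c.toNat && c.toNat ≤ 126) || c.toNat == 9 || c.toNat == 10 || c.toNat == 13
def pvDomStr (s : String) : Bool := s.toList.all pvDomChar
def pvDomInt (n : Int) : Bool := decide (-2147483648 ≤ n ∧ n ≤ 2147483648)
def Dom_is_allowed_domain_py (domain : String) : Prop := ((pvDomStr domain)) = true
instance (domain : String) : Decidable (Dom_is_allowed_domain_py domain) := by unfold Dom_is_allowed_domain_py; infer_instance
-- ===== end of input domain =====

-- ===== PORT A =====
-- B replaces A's scan over the allowed-domain set (endswith per entry) by set lookups on the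
-- domain's own dot-boundary suffixes; objective: alternative structure (not claimed faster).
def pvAllowed : List String :=
  ["cninfo.com.cn", "sse.com.cn", "szse.cn", "szse.com.cn",
   "stcn.com", "cnstock.com", "cs.com.cn", "cls.cn",
   "finance.sina.com.cn", "eastmoney.com", "10jqka.com.cn"]

def is_allowed_domain_py (domain : String) : Bool :=
  let d := PySem.Str.strip (PySem.Str.lower domain)
  if d = "" then false
  else pvAllowed.any (fun s => d == s || PySem.Str.endswith d ("." ++ s))

-- ===== PORT B =====
def is_allowed_domain_py_alt (domain : String) : Bool :=
  let d := PySem.Str.strip (PySem.Str.lower domain)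
  if d = "" then false
  else if pvAllowed.contains d then true
  else (PySem.List.enumerate d.toList 0).any
    (fun p => p.2 == '.' && pvAllowed.contains (PySem.Str.slice d (some (p.1 + 1)) none))


-- ===== PRECONDITION & SPEC =====
def Spec_is_allowed_domain_py (domain : String) (out : Bool) : Prop := out = is_allowed_domain_py_alt domain
instance (domain : String) (out : Bool) : Decidable (Spec_is_allowed_domain_py domain out) := by unfold Spec_is_allowed_domain_py; infer_instance

-- ===== CLAIM (what is proved, stated in full; the proofs are below) =====
def Claim_equal_is_allowed_domain_py : Prop := ∀ (domain : String), Dom_is_allowed_domain_py domain → Spec_is_allowed_domain_py domain (is_allowed_domain_py domain)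

-- ===== LEMMAS AND PROOFS =====

-- ===== VERDICT (by name: the statement is the Claim_ definition above) =====
lemma pv_suffix_iff (cs t : List Char) :
    ('.' :: t) <:+ cs ↔ ∃ k, ∃ h : k < cs.length, cs[k] = '.' ∧ cs.drop (k + 1) = t := by
  constructor
  · rintro ⟨pre, rfl⟩
    refine ⟨pre.length, by simp, by simp, by simp⟩
  · rintro ⟨k, hk, hdot, hdrop⟩
    have hsplit : cs.drop k = '.' :: t := by
      rw [← List.getElem_cons_drop hk, hdot, hdrop]
    exact ⟨cs.take k, by rw [← hsplit]; exact List.take_append_drop k cs⟩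

lemma pv_key (d : String) :
    pvAllowed.any (fun s => d == s || PySem.Str.endswith d ("." ++ s)) =
    (pvAllowed.contains d ||
      (PySem.List.enumerate d.toList 0).any
        (fun p => p.2 == '.' && pvAllowed.contains (PySem.Str.slice d (some (p.1 + 1)) none))) := by
  apply Bool.eq_iff_iff.mpr
  simp only [List.any_eq_true, Bool.or_eq_true, List.contains_eq_any_beq, beq_iff_eq,
    Bool.and_eq_true, PySem.Str.endswith_eq, PySem.Chars.endswith_iff,
    PySem.List.mem_enumerate_iff]
  have hto : ∀ (k : Nat), k < d.toList.length →
      (PySem.Str.slice d (some ((0 : Int) + (k : Int) + 1)) none).toList = d.toList.drop (k + 1) := by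
    intro k _
    have hcast : (0 : Int) + (k : Int) + 1 = ((k + 1 : Nat) : Int) := by push_cast; ring
    simp only [PySem.Str.toList_slice, PySem.Chars.slice_eq_listSlice, hcast,
      PySem.List.slice_from_natCast]
  constructor
  · rintro ⟨s, hs, h | h⟩
    · exact Or.inl ⟨s, hs, h⟩
    · right
      rw [show ("." ++ s).toList = '.' :: s.toList by simp] at h
      obtain ⟨k, hk, hdot, hdrop⟩ := (pv_suffix_iff _ _).mp h
      refine ⟨((0 : Int) + (k : Int), d.toList[k]), ⟨k, hk, rfl⟩, hdot, s, hs, ?_⟩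
      apply String.toList_inj.mp
      rw [hto k hk, hdrop]
  · rintro (⟨s, hs, h⟩ | ⟨p, ⟨k, hk, rfl⟩, hdot, s, hs, hslice⟩)
    · exact ⟨s, hs, Or.inl h⟩
    · refine ⟨s, hs, Or.inr ?_⟩
      rw [show ("." ++ s).toList = '.' :: s.toList by simp]
      refine (pv_suffix_iff _ _).mpr ⟨k, hk, hdot, ?_⟩
      rw [← hto k hk, hslice]

theorem is_allowed_domain_py_spec : Claim_equal_is_allowed_domain_py := by
  intro domain _
  unfold Spec_is_allowed_domain_py is_allowed_domain_py is_allowed_domain_py_alt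
  set d := PySem.Str.strip (PySem.Str.lower domain) with hd
  by_cases h : d = ""
  · simp [h]
  · simp only [h]
    rw [pv_key d]
    cases pvAllowed.contains d <;> simp
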